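-- pv_equiv track=rewrite | github.com/JuanTrentinTelli/ghostopcode | modules/subdomain_enum.py | _takeover_message
-- ===== SOURCE A (Python) =====
-- TAKEOVER_SIGNATURES: dict[str, str] = {
--     "s3.amazonaws.com": "AWS S3 bucket — check if unclaimed",
--     "amazonaws.com": "AWS S3 bucket — check if unclaimed",
--     "github.io": "GitHub Pages — check if repo exists",
--     "herokuapp.com": "Heroku — check if app exists",
--     "azurewebsites.net": "Azure — check if app exists",
--     "vercel.app": "Vercel — check if project exists",
--     "netlify.app": "Netlify — check if site exists",
--     "pages.dev": "Cloudflare Pages — check if project exists",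
--     "myshopify.com": "Shopify — check if store exists",
--     "ghost.io": "Ghost — check if blog exists",
--     "freshdesk.com": "Freshdesk — check if account exists",
--     "zendesk.com": "Zendesk — check if account exists",
--     "readme.io": "ReadMe — check if docs exist",
-- }
--
-- def _takeover_message(cname: str | None) -> str | None:
--     if not cname:
--         return None
--     c = cname.lower()
--     # Longer keys first for specificity
--     for sig, msg in sorted(TAKEOVER_SIGNATURES.items(), key=lambda x: -len(x[0])):
--         if sig in c:
--             return msg
--     return None
-- ===== SOURCE B (Python) =====
-- TAKEOVER_SIGNATURES: dict[str, str] = {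
--     "s3.amazonaws.com": "AWS S3 bucket — check if unclaimed",
--     "amazonaws.com": "AWS S3 bucket — check if unclaimed",
--     "github.io": "GitHub Pages — check if repo exists",
--     "herokuapp.com": "Heroku — check if app exists",
--     "azurewebsites.net": "Azure — check if app exists",
--     "vercel.app": "Vercel — check if project exists",
--     "netlify.app": "Netlify — check if site exists",
--     "pages.dev": "Cloudflare Pages — check if project exists",
--     "myshopify.com": "Shopify — check if store exists",
--     "ghost.io": "Ghost — check if blog exists",
--     "freshdesk.com": "Freshdesk — check if account exists",
--     "zendesk.com": "Zendesk — check if account exists",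
--     "readme.io": "ReadMe — check if docs exist",
-- }
--
-- def _takeover_message(cname: str | None) -> str | None:
--     if not cname:
--         return None
--     c = cname.lower()
--     matches = [sig for sig in TAKEOVER_SIGNATURES if sig in c]
--     if not matches:
--         return None
--     # max returns the FIRST longest match in insertion order, exactly the
--     # signature A's stable length-descending sort would reach first.
--     return TAKEOVER_SIGNATURES[max(matches, key=len)]
-- ===== Notes on version B (the rewrite author's own statement) =====
-- stated objective: simpler
-- what changed: A sorts all 13 signatures by descending length and early-returns on the first substring hit; B collects the matching signatures in one pass and returns the message of the longest match (max with key=len, first on ties), eliminating the sort.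
import Mathlib
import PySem

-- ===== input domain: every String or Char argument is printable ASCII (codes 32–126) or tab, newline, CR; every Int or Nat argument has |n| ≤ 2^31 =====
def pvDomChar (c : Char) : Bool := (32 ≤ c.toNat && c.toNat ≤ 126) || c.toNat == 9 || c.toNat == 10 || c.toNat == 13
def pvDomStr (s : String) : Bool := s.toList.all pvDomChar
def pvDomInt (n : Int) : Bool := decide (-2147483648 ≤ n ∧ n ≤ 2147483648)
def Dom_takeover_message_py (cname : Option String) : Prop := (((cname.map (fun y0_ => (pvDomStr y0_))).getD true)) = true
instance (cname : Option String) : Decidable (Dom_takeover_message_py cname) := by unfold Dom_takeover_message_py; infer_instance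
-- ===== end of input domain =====

-- B replaces A's 'sort all signatures by descending length, return first hit' with
-- 'collect the matching signatures, take the longest (first in insertion order on ties)'
-- — a simpler decomposition, no sort. Return-value equivalence proved on all inputs.

-- ===== PORT A =====
-- the module constant TAKEOVER_SIGNATURES (dict literal; .items() = this list)
def takeoverSignatures : List (String × String) :=
  [ ("s3.amazonaws.com", "AWS S3 bucket — check if unclaimed"),
    ("amazonaws.com", "AWS S3 bucket — check if unclaimed"),
    ("github.io", "GitHub Pages — check if repo exists"),
    ("herokuapp.com", "Heroku — check if app exists"),
    ("azurewebsites.net", "Azure — check if app exists"),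
    ("vercel.app", "Vercel — check if project exists"),
    ("netlify.app", "Netlify — check if site exists"),
    ("pages.dev", "Cloudflare Pages — check if project exists"),
    ("myshopify.com", "Shopify — check if store exists"),
    ("ghost.io", "Ghost — check if blog exists"),
    ("freshdesk.com", "Freshdesk — check if account exists"),
    ("zendesk.com", "Zendesk — check if account exists"),
    ("readme.io", "ReadMe — check if docs exist") ]

-- the for-loop with early return
def takeoverLoopA : List (String × String) → String → Option String
  | [], _ => none
  | (sig, msg) :: rest, c => if PySem.Str.isIn sig c then some msg else takeoverLoopA rest c

def takeover_message_py (cname : Option String) : Option String :=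
  match cname with
  | none => none
  | some s =>
    if s.toList = [] then none   -- 'not cname' (None handled above)
    else
      let c := PySem.Str.lower s
      takeoverLoopA (PySem.List.sorted takeoverSignatures (fun x => -(PySem.Str.len x.1)) false) c

-- ===== PORT B =====
def takeover_message_py_alt (cname : Option String) : Option String :=
  match cname with
  | none => none
  | some s =>
    if s.toList = [] then none
    else
      let c := PySem.Str.lower s
      let hits := (takeoverSignatures.map (fun p => p.1)).filter (fun sig => PySem.Str.isIn sig c)
      match PySem.List.max? hits (fun sig => PySem.Str.len sig) with
      | none => none
      | some m => (PySem.Dict.mk takeoverSignatures).get? m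
        -- TAKEOVER_SIGNATURES[m]; m is always a key, so get? is always some here

-- ===== PRECONDITION & SPEC =====
def Spec_takeover_message_py (cname : Option String) (out : Option String) : Prop := out = takeover_message_py_alt cname
instance (cname : Option String) (out : Option String) : Decidable (Spec_takeover_message_py cname out) := by unfold Spec_takeover_message_py; infer_instance

-- ===== CLAIM (what is proved, stated in full; the proofs are below) =====
def Claim_equal_takeover_message_py : Prop := ∀ (cname : Option String), Dom_takeover_message_py cname → Spec_takeover_message_py cname (takeover_message_py cname)

-- ===== LEMMAS AND PROOFS =====

-- the sorted constant, evaluated once (stable length-descending order)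
lemma takeover_sorted_eval :
    PySem.List.sorted takeoverSignatures (fun x => -(PySem.Str.len x.1)) false =
  [ ("azurewebsites.net", "Azure — check if app exists"),
    ("s3.amazonaws.com", "AWS S3 bucket — check if unclaimed"),
    ("amazonaws.com", "AWS S3 bucket — check if unclaimed"),
    ("herokuapp.com", "Heroku — check if app exists"),
    ("myshopify.com", "Shopify — check if store exists"),
    ("freshdesk.com", "Freshdesk — check if account exists"),
    ("netlify.app", "Netlify — check if site exists"),
    ("zendesk.com", "Zendesk — check if account exists"),
    ("vercel.app", "Vercel — check if project exists"),
    ("github.io", "GitHub Pages — check if repo exists"),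
    ("pages.dev", "Cloudflare Pages — check if project exists"),
    ("readme.io", "ReadMe — check if docs exist"),
    ("ghost.io", "Ghost — check if blog exists") ] := by decide

-- folding the max?-step from a current best x over elements no larger keeps x
def pvStep {A K : Type} [LT K] [DecidableLT K] (key : A -> K) (acc : Option A) (z : A) : Option A :=
  match acc with
  | none => some z
  | some m => if key m < key z then some z else some m

lemma pvFoldKeep {A K : Type} [LinearOrder K] (key : A -> K) (x : A) :
    forall (l : List A), (forall y, y ∈ l -> key y ≤ key x) ->
      List.foldl (pvStep key) (some x) l = some x := by
  intro l
  induction l with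
  | nil => intro _; rfl
  | cons a t ih =>
    intro h
    have ha : ¬ key x < key a := not_lt.mpr (h a (by simp))
    simp only [List.foldl_cons, pvStep, if_neg ha]
    exact ih fun y hy => h y (by simp [hy])

-- folding over elements strictly below key x keeps the accumulator none or strictly below
lemma pvFoldPre {A K : Type} [LinearOrder K] (key : A -> K) (x : A) :
    forall (l : List A) (acc : Option A), (forall y, y ∈ l -> key y < key x) ->
      (acc = none ∨ ∃ m, acc = some m ∧ key m < key x) ->
      (List.foldl (pvStep key) acc l = none ∨
        ∃ m, List.foldl (pvStep key) acc l = some m ∧ key m < key x) := by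
  intro l
  induction l with
  | nil => intro acc _ hacc; exact hacc
  | cons a t ih =>
    intro acc h hacc
    have ha : key a < key x := h a (by simp)
    have hstep : pvStep key acc a = none ∨ ∃ m, pvStep key acc a = some m ∧ key m < key x := by
      rcases hacc with rfl | ⟨m, rfl, hm⟩
      · exact Or.inr ⟨a, rfl, ha⟩
      · by_cases hlt : key m < key a
        · exact Or.inr ⟨a, by simp [pvStep, hlt], ha⟩
        · exact Or.inr ⟨m, by simp [pvStep, hlt], hm⟩
    simpa only [List.foldl_cons] using ih _ (fun y hy => h y (by simp [hy])) hstep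

-- max? returns the first maximal element: the one after a strictly smaller prefix and a no-larger suffix
lemma pvMaxFirst {A K : Type} [LinearOrder K] (key : A -> K) (l1 l2 : List A) (x : A)
    (h1 : forall y, y ∈ l1 -> key y < key x) (h2 : forall y, y ∈ l2 -> key y ≤ key x) :
    PySem.List.max? (l1 ++ x :: l2) key = some x := by
  have hdef : PySem.List.max? (l1 ++ x :: l2) key = List.foldl (pvStep key) none (l1 ++ x :: l2) := rfl
  rw [hdef, List.foldl_append, List.foldl_cons]
  rcases pvFoldPre key x l1 none h1 (Or.inl rfl) with h | ⟨m, hm, hlt⟩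
  · rw [h, show pvStep key none x = some x from rfl]
    exact pvFoldKeep key x l2 h2
  · rw [hm, show pvStep key (some m) x = some x from by simp [pvStep, hlt]]
    exact pvFoldKeep key x l2 h2

-- the same through a filter over the unfiltered split
lemma pvMaxFilterFirst {A K : Type} [LinearOrder K] (key : A -> K) (f : A -> Bool) (l1 l2 : List A) (x : A)
    (hfx : f x = true)
    (h1 : forall y, y ∈ l1 -> f y = true -> key y < key x)
    (h2 : forall y, y ∈ l2 -> f y = true -> key y ≤ key x) :
    PySem.List.max? ((l1 ++ x :: l2).filter f) key = some x := by
  rw [List.filter_append, List.filter_cons_of_pos hfx]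
  exact pvMaxFirst key _ _ x
    (fun y hy => h1 y (List.mem_of_mem_filter hy) (List.of_mem_filter hy))
    (fun y hy => h2 y (List.mem_of_mem_filter hy) (List.of_mem_filter hy))

-- core: A's early-return scan of the sorted list equals B's argmax over the matches,
-- by cases on the first matching signature in sorted order
lemma takeover_chains_agree (c : String) :
    takeoverLoopA (PySem.List.sorted takeoverSignatures (fun x => -(PySem.Str.len x.1)) false) c =
    (match PySem.List.max?
        ((takeoverSignatures.map (fun p => p.1)).filter (fun sig => PySem.Str.isIn sig c))
        (fun sig => PySem.Str.len sig) with
      | none => none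
      | some m => (PySem.Dict.mk takeoverSignatures).get? m) := by
  rw [takeover_sorted_eval]
  cases h1 : PySem.Str.isIn "azurewebsites.net" c with
  | true =>
    have hmax : PySem.List.max? ((takeoverSignatures.map (fun p => p.1)).filter (fun sig => PySem.Str.isIn sig c)) (fun sig => PySem.Str.len sig) = some "azurewebsites.net" := by
      rw [show (takeoverSignatures.map (fun p => p.1)) = ["s3.amazonaws.com", "amazonaws.com", "github.io", "herokuapp.com"] ++ "azurewebsites.net" :: ["vercel.app", "netlify.app", "pages.dev", "myshopify.com", "ghost.io", "freshdesk.com", "zendesk.com", "readme.io"] from rfl]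
      refine pvMaxFilterFirst (fun s => PySem.Str.len s) (fun sig => PySem.Str.isIn sig c) _ _ _ h1 ?_ ?_
      · intro y hy hfy
        simp only [List.mem_cons, List.not_mem_nil, or_false] at hy
        rcases hy with rfl|rfl|rfl|rfl
        · decide
        · decide
        · decide
        · decide
      · intro y hy hfy
        simp only [List.mem_cons, List.not_mem_nil, or_false] at hy
        rcases hy with rfl|rfl|rfl|rfl|rfl|rfl|rfl|rfl
        · decide
        · decide
        · decide
        · decide
        · decide
        · decide
        · decide
        · decide
    rw [hmax]
    simp only [takeoverLoopA, h1, if_true]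
    decide
  | false =>
    cases h2 : PySem.Str.isIn "s3.amazonaws.com" c with
    | true =>
      have hmax : PySem.List.max? ((takeoverSignatures.map (fun p => p.1)).filter (fun sig => PySem.Str.isIn sig c)) (fun sig => PySem.Str.len sig) = some "s3.amazonaws.com" := by
        rw [show (takeoverSignatures.map (fun p => p.1)) = [] ++ "s3.amazonaws.com" :: ["amazonaws.com", "github.io", "herokuapp.com", "azurewebsites.net", "vercel.app", "netlify.app", "pages.dev", "myshopify.com", "ghost.io", "freshdesk.com", "zendesk.com", "readme.io"] from rfl]
        refine pvMaxFilterFirst (fun s => PySem.Str.len s) (fun sig => PySem.Str.isIn sig c) _ _ _ h2 ?_ ?_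
        · intro y hy hfy
          simp at hy
        · intro y hy hfy
          simp only [List.mem_cons, List.not_mem_nil, or_false] at hy
          rcases hy with rfl|rfl|rfl|rfl|rfl|rfl|rfl|rfl|rfl|rfl|rfl|rfl
          · decide
          · decide
          · decide
          · simp only [h1] at hfy; exact Bool.noConfusion hfy
          · decide
          · decide
          · decide
          · decide
          · decide
          · decide
          · decide
          · decide
      rw [hmax]
      simp only [takeoverLoopA, h1, h2, if_true, if_false, Bool.false_eq_true]
      decide
    | false =>
      cases h3 : PySem.Str.isIn "amazonaws.com" c with
      | true =>
        have hmax : PySem.List.max? ((takeoverSignatures.map (fun p => p.1)).filter (fun sig => PySem.Str.isIn sig c)) (fun sig => PySem.Str.len sig) = some "amazonaws.com" := by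
          rw [show (takeoverSignatures.map (fun p => p.1)) = ["s3.amazonaws.com"] ++ "amazonaws.com" :: ["github.io", "herokuapp.com", "azurewebsites.net", "vercel.app", "netlify.app", "pages.dev", "myshopify.com", "ghost.io", "freshdesk.com", "zendesk.com", "readme.io"] from rfl]
          refine pvMaxFilterFirst (fun s => PySem.Str.len s) (fun sig => PySem.Str.isIn sig c) _ _ _ h3 ?_ ?_
          · intro y hy hfy
            simp only [List.mem_cons, List.not_mem_nil, or_false] at hy
            rcases hy with rfl
            · simp only [h2] at hfy; exact Bool.noConfusion hfy
          · intro y hy hfy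
            simp only [List.mem_cons, List.not_mem_nil, or_false] at hy
            rcases hy with rfl|rfl|rfl|rfl|rfl|rfl|rfl|rfl|rfl|rfl|rfl
            · decide
            · decide
            · simp only [h1] at hfy; exact Bool.noConfusion hfy
            · decide
            · decide
            · decide
            · decide
            · decide
            · decide
            · decide
            · decide
        rw [hmax]
        simp only [takeoverLoopA, h1, h2, h3, if_true, if_false, Bool.false_eq_true]
        decide
      | false =>
        cases h4 : PySem.Str.isIn "herokuapp.com" c with
        | true =>
          have hmax : PySem.List.max? ((takeoverSignatures.map (fun p => p.1)).filter (fun sig => PySem.Str.isIn sig c)) (fun sig => PySem.Str.len sig) = some "herokuapp.com" := by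
            rw [show (takeoverSignatures.map (fun p => p.1)) = ["s3.amazonaws.com", "amazonaws.com", "github.io"] ++ "herokuapp.com" :: ["azurewebsites.net", "vercel.app", "netlify.app", "pages.dev", "myshopify.com", "ghost.io", "freshdesk.com", "zendesk.com", "readme.io"] from rfl]
            refine pvMaxFilterFirst (fun s => PySem.Str.len s) (fun sig => PySem.Str.isIn sig c) _ _ _ h4 ?_ ?_
            · intro y hy hfy
              simp only [List.mem_cons, List.not_mem_nil, or_false] at hy
              rcases hy with rfl|rfl|rfl
              · simp only [h2] at hfy; exact Bool.noConfusion hfy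
              · simp only [h3] at hfy; exact Bool.noConfusion hfy
              · decide
            · intro y hy hfy
              simp only [List.mem_cons, List.not_mem_nil, or_false] at hy
              rcases hy with rfl|rfl|rfl|rfl|rfl|rfl|rfl|rfl|rfl
              · simp only [h1] at hfy; exact Bool.noConfusion hfy
              · decide
              · decide
              · decide
              · decide
              · decide
              · decide
              · decide
              · decide
          rw [hmax]
          simp only [takeoverLoopA, h1, h2, h3, h4, if_true, if_false, Bool.false_eq_true]
          decide
        | false =>
          cases h5 : PySem.Str.isIn "myshopify.com" c with
          | true =>
            have hmax : PySem.List.max? ((takeoverSignatures.map (fun p => p.1)).filter (fun sig => PySem.Str.isIn sig c)) (fun sig => PySem.Str.len sig) = some "myshopify.com" := by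
              rw [show (takeoverSignatures.map (fun p => p.1)) = ["s3.amazonaws.com", "amazonaws.com", "github.io", "herokuapp.com", "azurewebsites.net", "vercel.app", "netlify.app", "pages.dev"] ++ "myshopify.com" :: ["ghost.io", "freshdesk.com", "zendesk.com", "readme.io"] from rfl]
              refine pvMaxFilterFirst (fun s => PySem.Str.len s) (fun sig => PySem.Str.isIn sig c) _ _ _ h5 ?_ ?_
              · intro y hy hfy
                simp only [List.mem_cons, List.not_mem_nil, or_false] at hy
                rcases hy with rfl|rfl|rfl|rfl|rfl|rfl|rfl|rfl
                · simp only [h2] at hfy; exact Bool.noConfusion hfy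
                · simp only [h3] at hfy; exact Bool.noConfusion hfy
                · decide
                · simp only [h4] at hfy; exact Bool.noConfusion hfy
                · simp only [h1] at hfy; exact Bool.noConfusion hfy
                · decide
                · decide
                · decide
              · intro y hy hfy
                simp only [List.mem_cons, List.not_mem_nil, or_false] at hy
                rcases hy with rfl|rfl|rfl|rfl
                · decide
                · decide
                · decide
                · decide
            rw [hmax]
            simp only [takeoverLoopA, h1, h2, h3, h4, h5, if_true, if_false, Bool.false_eq_true]
            decide
          | false =>
            cases h6 : PySem.Str.isIn "freshdesk.com" c with
            | true =>
              have hmax : PySem.List.max? ((takeoverSignatures.map (fun p => p.1)).filter (fun sig => PySem.Str.isIn sig c)) (fun sig => PySem.Str.len sig) = some "freshdesk.com" := by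
                rw [show (takeoverSignatures.map (fun p => p.1)) = ["s3.amazonaws.com", "amazonaws.com", "github.io", "herokuapp.com", "azurewebsites.net", "vercel.app", "netlify.app", "pages.dev", "myshopify.com", "ghost.io"] ++ "freshdesk.com" :: ["zendesk.com", "readme.io"] from rfl]
                refine pvMaxFilterFirst (fun s => PySem.Str.len s) (fun sig => PySem.Str.isIn sig c) _ _ _ h6 ?_ ?_
                · intro y hy hfy
                  simp only [List.mem_cons, List.not_mem_nil, or_false] at hy
                  rcases hy with rfl|rfl|rfl|rfl|rfl|rfl|rfl|rfl|rfl|rfl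
                  · simp only [h2] at hfy; exact Bool.noConfusion hfy
                  · simp only [h3] at hfy; exact Bool.noConfusion hfy
                  · decide
                  · simp only [h4] at hfy; exact Bool.noConfusion hfy
                  · simp only [h1] at hfy; exact Bool.noConfusion hfy
                  · decide
                  · decide
                  · decide
                  · simp only [h5] at hfy; exact Bool.noConfusion hfy
                  · decide
                · intro y hy hfy
                  simp only [List.mem_cons, List.not_mem_nil, or_false] at hy
                  rcases hy with rfl|rfl
                  · decide
                  · decide
              rw [hmax]
              simp only [takeoverLoopA, h1, h2, h3, h4, h5, h6, if_true, if_false, Bool.false_eq_true]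
              decide
            | false =>
              cases h7 : PySem.Str.isIn "netlify.app" c with
              | true =>
                have hmax : PySem.List.max? ((takeoverSignatures.map (fun p => p.1)).filter (fun sig => PySem.Str.isIn sig c)) (fun sig => PySem.Str.len sig) = some "netlify.app" := by
                  rw [show (takeoverSignatures.map (fun p => p.1)) = ["s3.amazonaws.com", "amazonaws.com", "github.io", "herokuapp.com", "azurewebsites.net", "vercel.app"] ++ "netlify.app" :: ["pages.dev", "myshopify.com", "ghost.io", "freshdesk.com", "zendesk.com", "readme.io"] from rfl]
                  refine pvMaxFilterFirst (fun s => PySem.Str.len s) (fun sig => PySem.Str.isIn sig c) _ _ _ h7 ?_ ?_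
                  · intro y hy hfy
                    simp only [List.mem_cons, List.not_mem_nil, or_false] at hy
                    rcases hy with rfl|rfl|rfl|rfl|rfl|rfl
                    · simp only [h2] at hfy; exact Bool.noConfusion hfy
                    · simp only [h3] at hfy; exact Bool.noConfusion hfy
                    · decide
                    · simp only [h4] at hfy; exact Bool.noConfusion hfy
                    · simp only [h1] at hfy; exact Bool.noConfusion hfy
                    · decide
                  · intro y hy hfy
                    simp only [List.mem_cons, List.not_mem_nil, or_false] at hy
                    rcases hy with rfl|rfl|rfl|rfl|rfl|rfl
                    · decide
                    · simp only [h5] at hfy; exact Bool.noConfusion hfy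
                    · decide
                    · simp only [h6] at hfy; exact Bool.noConfusion hfy
                    · decide
                    · decide
                rw [hmax]
                simp only [takeoverLoopA, h1, h2, h3, h4, h5, h6, h7, if_true, if_false, Bool.false_eq_true]
                decide
              | false =>
                cases h8 : PySem.Str.isIn "zendesk.com" c with
                | true =>
                  have hmax : PySem.List.max? ((takeoverSignatures.map (fun p => p.1)).filter (fun sig => PySem.Str.isIn sig c)) (fun sig => PySem.Str.len sig) = some "zendesk.com" := by
                    rw [show (takeoverSignatures.map (fun p => p.1)) = ["s3.amazonaws.com", "amazonaws.com", "github.io", "herokuapp.com", "azurewebsites.net", "vercel.app", "netlify.app", "pages.dev", "myshopify.com", "ghost.io", "freshdesk.com"] ++ "zendesk.com" :: ["readme.io"] from rfl]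
                    refine pvMaxFilterFirst (fun s => PySem.Str.len s) (fun sig => PySem.Str.isIn sig c) _ _ _ h8 ?_ ?_
                    · intro y hy hfy
                      simp only [List.mem_cons, List.not_mem_nil, or_false] at hy
                      rcases hy with rfl|rfl|rfl|rfl|rfl|rfl|rfl|rfl|rfl|rfl|rfl
                      · simp only [h2] at hfy; exact Bool.noConfusion hfy
                      · simp only [h3] at hfy; exact Bool.noConfusion hfy
                      · decide
                      · simp only [h4] at hfy; exact Bool.noConfusion hfy
                      · simp only [h1] at hfy; exact Bool.noConfusion hfy
                      · decide
                      · simp only [h7] at hfy; exact Bool.noConfusion hfy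
                      · decide
                      · simp only [h5] at hfy; exact Bool.noConfusion hfy
                      · decide
                      · simp only [h6] at hfy; exact Bool.noConfusion hfy
                    · intro y hy hfy
                      simp only [List.mem_cons, List.not_mem_nil, or_false] at hy
                      rcases hy with rfl
                      · decide
                  rw [hmax]
                  simp only [takeoverLoopA, h1, h2, h3, h4, h5, h6, h7, h8, if_true, if_false, Bool.false_eq_true]
                  decide
                | false =>
                  cases h9 : PySem.Str.isIn "vercel.app" c with
                  | true =>
                    have hmax : PySem.List.max? ((takeoverSignatures.map (fun p => p.1)).filter (fun sig => PySem.Str.isIn sig c)) (fun sig => PySem.Str.len sig) = some "vercel.app" := by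
                      rw [show (takeoverSignatures.map (fun p => p.1)) = ["s3.amazonaws.com", "amazonaws.com", "github.io", "herokuapp.com", "azurewebsites.net"] ++ "vercel.app" :: ["netlify.app", "pages.dev", "myshopify.com", "ghost.io", "freshdesk.com", "zendesk.com", "readme.io"] from rfl]
                      refine pvMaxFilterFirst (fun s => PySem.Str.len s) (fun sig => PySem.Str.isIn sig c) _ _ _ h9 ?_ ?_
                      · intro y hy hfy
                        simp only [List.mem_cons, List.not_mem_nil, or_false] at hy
                        rcases hy with rfl|rfl|rfl|rfl|rfl
                        · simp only [h2] at hfy; exact Bool.noConfusion hfy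
                        · simp only [h3] at hfy; exact Bool.noConfusion hfy
                        · decide
                        · simp only [h4] at hfy; exact Bool.noConfusion hfy
                        · simp only [h1] at hfy; exact Bool.noConfusion hfy
                      · intro y hy hfy
                        simp only [List.mem_cons, List.not_mem_nil, or_false] at hy
                        rcases hy with rfl|rfl|rfl|rfl|rfl|rfl|rfl
                        · simp only [h7] at hfy; exact Bool.noConfusion hfy
                        · decide
                        · simp only [h5] at hfy; exact Bool.noConfusion hfy
                        · decide
                        · simp only [h6] at hfy; exact Bool.noConfusion hfy
                        · simp only [h8] at hfy; exact Bool.noConfusion hfy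
                        · decide
                    rw [hmax]
                    simp only [takeoverLoopA, h1, h2, h3, h4, h5, h6, h7, h8, h9, if_true, if_false, Bool.false_eq_true]
                    decide
                  | false =>
                    cases h10 : PySem.Str.isIn "github.io" c with
                    | true =>
                      have hmax : PySem.List.max? ((takeoverSignatures.map (fun p => p.1)).filter (fun sig => PySem.Str.isIn sig c)) (fun sig => PySem.Str.len sig) = some "github.io" := by
                        rw [show (takeoverSignatures.map (fun p => p.1)) = ["s3.amazonaws.com", "amazonaws.com"] ++ "github.io" :: ["herokuapp.com", "azurewebsites.net", "vercel.app", "netlify.app", "pages.dev", "myshopify.com", "ghost.io", "freshdesk.com", "zendesk.com", "readme.io"] from rfl]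
                        refine pvMaxFilterFirst (fun s => PySem.Str.len s) (fun sig => PySem.Str.isIn sig c) _ _ _ h10 ?_ ?_
                        · intro y hy hfy
                          simp only [List.mem_cons, List.not_mem_nil, or_false] at hy
                          rcases hy with rfl|rfl
                          · simp only [h2] at hfy; exact Bool.noConfusion hfy
                          · simp only [h3] at hfy; exact Bool.noConfusion hfy
                        · intro y hy hfy
                          simp only [List.mem_cons, List.not_mem_nil, or_false] at hy
                          rcases hy with rfl|rfl|rfl|rfl|rfl|rfl|rfl|rfl|rfl|rfl
                          · simp only [h4] at hfy; exact Bool.noConfusion hfy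
                          · simp only [h1] at hfy; exact Bool.noConfusion hfy
                          · simp only [h9] at hfy; exact Bool.noConfusion hfy
                          · simp only [h7] at hfy; exact Bool.noConfusion hfy
                          · decide
                          · simp only [h5] at hfy; exact Bool.noConfusion hfy
                          · decide
                          · simp only [h6] at hfy; exact Bool.noConfusion hfy
                          · simp only [h8] at hfy; exact Bool.noConfusion hfy
                          · decide
                      rw [hmax]
                      simp only [takeoverLoopA, h1, h2, h3, h4, h5, h6, h7, h8, h9, h10, if_true, if_false, Bool.false_eq_true]
                      decide
                    | false =>
                      cases h11 : PySem.Str.isIn "pages.dev" c with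
                      | true =>
                        have hmax : PySem.List.max? ((takeoverSignatures.map (fun p => p.1)).filter (fun sig => PySem.Str.isIn sig c)) (fun sig => PySem.Str.len sig) = some "pages.dev" := by
                          rw [show (takeoverSignatures.map (fun p => p.1)) = ["s3.amazonaws.com", "amazonaws.com", "github.io", "herokuapp.com", "azurewebsites.net", "vercel.app", "netlify.app"] ++ "pages.dev" :: ["myshopify.com", "ghost.io", "freshdesk.com", "zendesk.com", "readme.io"] from rfl]
                          refine pvMaxFilterFirst (fun s => PySem.Str.len s) (fun sig => PySem.Str.isIn sig c) _ _ _ h11 ?_ ?_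
                          · intro y hy hfy
                            simp only [List.mem_cons, List.not_mem_nil, or_false] at hy
                            rcases hy with rfl|rfl|rfl|rfl|rfl|rfl|rfl
                            · simp only [h2] at hfy; exact Bool.noConfusion hfy
                            · simp only [h3] at hfy; exact Bool.noConfusion hfy
                            · simp only [h10] at hfy; exact Bool.noConfusion hfy
                            · simp only [h4] at hfy; exact Bool.noConfusion hfy
                            · simp only [h1] at hfy; exact Bool.noConfusion hfy
                            · simp only [h9] at hfy; exact Bool.noConfusion hfy
                            · simp only [h7] at hfy; exact Bool.noConfusion hfy
                          · intro y hy hfy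
                            simp only [List.mem_cons, List.not_mem_nil, or_false] at hy
                            rcases hy with rfl|rfl|rfl|rfl|rfl
                            · simp only [h5] at hfy; exact Bool.noConfusion hfy
                            · decide
                            · simp only [h6] at hfy; exact Bool.noConfusion hfy
                            · simp only [h8] at hfy; exact Bool.noConfusion hfy
                            · decide
                        rw [hmax]
                        simp only [takeoverLoopA, h1, h2, h3, h4, h5, h6, h7, h8, h9, h10, h11, if_true, if_false, Bool.false_eq_true]
                        decide
                      | false =>
                        cases h12 : PySem.Str.isIn "readme.io" c with
                        | true =>
                          have hmax : PySem.List.max? ((takeoverSignatures.map (fun p => p.1)).filter (fun sig => PySem.Str.isIn sig c)) (fun sig => PySem.Str.len sig) = some "readme.io" := by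
                            rw [show (takeoverSignatures.map (fun p => p.1)) = ["s3.amazonaws.com", "amazonaws.com", "github.io", "herokuapp.com", "azurewebsites.net", "vercel.app", "netlify.app", "pages.dev", "myshopify.com", "ghost.io", "freshdesk.com", "zendesk.com"] ++ "readme.io" :: [] from rfl]
                            refine pvMaxFilterFirst (fun s => PySem.Str.len s) (fun sig => PySem.Str.isIn sig c) _ _ _ h12 ?_ ?_
                            · intro y hy hfy
                              simp only [List.mem_cons, List.not_mem_nil, or_false] at hy
                              rcases hy with rfl|rfl|rfl|rfl|rfl|rfl|rfl|rfl|rfl|rfl|rfl|rfl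
                              · simp only [h2] at hfy; exact Bool.noConfusion hfy
                              · simp only [h3] at hfy; exact Bool.noConfusion hfy
                              · simp only [h10] at hfy; exact Bool.noConfusion hfy
                              · simp only [h4] at hfy; exact Bool.noConfusion hfy
                              · simp only [h1] at hfy; exact Bool.noConfusion hfy
                              · simp only [h9] at hfy; exact Bool.noConfusion hfy
                              · simp only [h7] at hfy; exact Bool.noConfusion hfy
                              · simp only [h11] at hfy; exact Bool.noConfusion hfy
                              · simp only [h5] at hfy; exact Bool.noConfusion hfy
                              · decide
                              · simp only [h6] at hfy; exact Bool.noConfusion hfy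
                              · simp only [h8] at hfy; exact Bool.noConfusion hfy
                            · intro y hy hfy
                              simp at hy
                          rw [hmax]
                          simp only [takeoverLoopA, h1, h2, h3, h4, h5, h6, h7, h8, h9, h10, h11, h12, if_true, if_false, Bool.false_eq_true]
                          decide
                        | false =>
                          cases h13 : PySem.Str.isIn "ghost.io" c with
                          | true =>
                            have hmax : PySem.List.max? ((takeoverSignatures.map (fun p => p.1)).filter (fun sig => PySem.Str.isIn sig c)) (fun sig => PySem.Str.len sig) = some "ghost.io" := by
                              rw [show (takeoverSignatures.map (fun p => p.1)) = ["s3.amazonaws.com", "amazonaws.com", "github.io", "herokuapp.com", "azurewebsites.net", "vercel.app", "netlify.app", "pages.dev", "myshopify.com"] ++ "ghost.io" :: ["freshdesk.com", "zendesk.com", "readme.io"] from rfl]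
                              refine pvMaxFilterFirst (fun s => PySem.Str.len s) (fun sig => PySem.Str.isIn sig c) _ _ _ h13 ?_ ?_
                              · intro y hy hfy
                                simp only [List.mem_cons, List.not_mem_nil, or_false] at hy
                                rcases hy with rfl|rfl|rfl|rfl|rfl|rfl|rfl|rfl|rfl
                                · simp only [h2] at hfy; exact Bool.noConfusion hfy
                                · simp only [h3] at hfy; exact Bool.noConfusion hfy
                                · simp only [h10] at hfy; exact Bool.noConfusion hfy
                                · simp only [h4] at hfy; exact Bool.noConfusion hfy
                                · simp only [h1] at hfy; exact Bool.noConfusion hfy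
                                · simp only [h9] at hfy; exact Bool.noConfusion hfy
                                · simp only [h7] at hfy; exact Bool.noConfusion hfy
                                · simp only [h11] at hfy; exact Bool.noConfusion hfy
                                · simp only [h5] at hfy; exact Bool.noConfusion hfy
                              · intro y hy hfy
                                simp only [List.mem_cons, List.not_mem_nil, or_false] at hy
                                rcases hy with rfl|rfl|rfl
                                · simp only [h6] at hfy; exact Bool.noConfusion hfy
                                · simp only [h8] at hfy; exact Bool.noConfusion hfy
                                · simp only [h12] at hfy; exact Bool.noConfusion hfy
                            rw [hmax]
                            simp only [takeoverLoopA, h1, h2, h3, h4, h5, h6, h7, h8, h9, h10, h11, h12, h13, if_true, if_false, Bool.false_eq_true]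
                            decide
                          | false =>
                            simp [PySem.Str.isIn_eq] at h1 h2 h3 h4 h5 h6 h7 h8 h9 h10 h11 h12 h13
                            simp [takeoverLoopA, takeoverSignatures, h1, h2, h3, h4, h5, h6, h7, h8, h9, h10, h11, h12, h13, PySem.List.max?]


-- ===== VERDICT (by name: the statement is the Claim_ definition above) =====
theorem takeover_message_py_spec : Claim_equal_takeover_message_py := by
  intro cname _
  unfold Spec_takeover_message_py takeover_message_py takeover_message_py_alt
  match cname with
  | none => rfl
  | some s =>
    by_cases h : s.toList = []
    · simp [h]
    · simp only [h, if_false]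
      exact takeover_chains_agree (PySem.Str.lower s)
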